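-- pv_equiv track=rewrite | github.com/issdandavis/SCBE-AETHERMOORE | packages/wit/scbe-transform/reference_impl.py | to_balanced_ternary
-- ===== SOURCE A (Python) =====
-- from typing import List, Tuple
--
-- def to_balanced_ternary(value: int) -> List[int]:
--     """Encode an integer in balanced ternary (trits: -1, 0, +1)."""
--     if value == 0:
--         return [0]
--
--     trits = []
--     n = abs(value)
--     while n > 0:
--         remainder = n % 3
--         if remainder == 2:
--             trits.append(-1)
--             n = (n + 1) // 3
--         else:
--             trits.append(remainder)
--             n //= 3
--
--     if value < 0:
--         trits = [-t for t in trits]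
--
--     trits.reverse()
--     return trits
-- ===== SOURCE B (Python) =====
-- def to_balanced_ternary(value):
--     """Balanced ternary via offset encoding: shift value by (3^k - 1)/2, take plain
--     base-3 digits (no carry branch), and subtract 1 from each digit."""
--     if value == 0:
--         return [0]
--     k, half = 1, 1            # half == (3**k - 1) // 2
--     while abs(value) > half:
--         k, half = k + 1, half * 3 + 1
--     m = value + half          # 0 <= m < 3**k
--     digits = []
--     for _ in range(k):
--         digits.append(m % 3 - 1)
--         m //= 3
--     digits.reverse()
--     return digits
-- ===== Notes on version B (the rewrite author's own statement) =====
-- stated objective: alternative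
-- what changed: B replaces A's per-digit remainder-2 carry loop with offset encoding: it finds the trit count k, shifts value by (3^k-1)/2 into the non-negative range, and reads off plain base-3 digits each minus 1, with no carry branch and no sign-reflection pass.
import Mathlib
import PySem

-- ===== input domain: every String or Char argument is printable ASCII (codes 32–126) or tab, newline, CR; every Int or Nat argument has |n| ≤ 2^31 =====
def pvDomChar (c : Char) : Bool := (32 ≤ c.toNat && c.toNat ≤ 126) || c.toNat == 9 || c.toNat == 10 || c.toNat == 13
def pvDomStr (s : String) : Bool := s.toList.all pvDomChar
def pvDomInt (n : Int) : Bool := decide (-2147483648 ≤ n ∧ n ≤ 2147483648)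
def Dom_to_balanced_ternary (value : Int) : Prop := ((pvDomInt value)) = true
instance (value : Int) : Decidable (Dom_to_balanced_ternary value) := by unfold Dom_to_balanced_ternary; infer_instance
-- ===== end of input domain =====

-- B replaces A's remainder-2 carry loop by offset encoding: shift value by (3^k-1)/2 and
-- take plain base-3 digits minus 1 (objective: alternative; same return values).
-- A's while loop carries explicit fuel (|n| strictly decreases, so |n| steps always
-- suffice), and so does B's half-searching loop (half grows past |value| within |value|
-- steps); the fuel is only a totality guard, not part of either algorithm.

-- ===== PORT A =====
-- A's while loop over n = abs(value), appending trits to an accumulator.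
def pvLoopA : Nat → Int → List Int → List Int
  | 0, _, trits => trits
  | fuel + 1, n, trits =>
    if 0 < n then
      let remainder := PySem.Int.mod n 3
      if remainder == 2 then
        pvLoopA fuel (PySem.Int.floordiv (n + 1) 3) (trits ++ [-1])
      else
        pvLoopA fuel (PySem.Int.floordiv n 3) (trits ++ [remainder])
    else trits

def to_balanced_ternary (value : Int) : List Int :=
  if value == 0 then [0]
  else
    let trits := pvLoopA (|value|).toNat (|value|) []
    let trits := if value < 0 then trits.map (fun t => -t) else trits
    trits.reverse

-- ===== PORT B =====
-- B's first while loop: find the smallest k with |value| ≤ half = (3^k - 1)/2.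
def pvFindK : Nat → Nat → Int → Int → Nat × Int
  | 0, k, half, _ => (k, half)
  | fuel + 1, k, half, a =>
    if half < a then pvFindK fuel (k + 1) (half * 3 + 1) a else (k, half)

-- B's for loop: the k low-order base-3 digits of m, each minus 1, low-order first.
def pvDigits : Nat → Int → List Int → List Int
  | 0, _, digits => digits
  | k + 1, m, digits =>
    pvDigits k (PySem.Int.floordiv m 3) (digits ++ [PySem.Int.mod m 3 - 1])

def to_balanced_ternary_alt (value : Int) : List Int :=
  if value == 0 then [0]
  else
    let p := pvFindK value.natAbs 1 1 (|value|)
    (pvDigits p.1 (value + p.2) []).reverse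

-- ===== PRECONDITION & SPEC =====
def Spec_to_balanced_ternary (value : Int) (out : List Int) : Prop := out = to_balanced_ternary_alt value
instance (value : Int) (out : List Int) : Decidable (Spec_to_balanced_ternary value out) := by unfold Spec_to_balanced_ternary; infer_instance

-- ===== CLAIM (what is proved, stated in full; the proofs are below) =====
def Claim_equal_to_balanced_ternary : Prop := ∀ (value : Int), Dom_to_balanced_ternary value → Spec_to_balanced_ternary value (to_balanced_ternary value)

-- ===== LEMMAS AND PROOFS =====

-- proof-only intermediate loop: A's recurrence threaded through the signed value
def pvLoopB : Nat → Int → List Int → List Int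
  | 0, _, trits => trits
  | fuel + 1, n, trits =>
    if n ≠ 0 then
      let rem := PySem.Int.mod n 3
      let n' := PySem.Int.floordiv n 3
      if rem == 2 then
        pvLoopB fuel (n' + 1) (trits ++ [-1])
      else
        pvLoopB fuel n' (trits ++ [rem])
    else trits

-- proof-only closed form of B's half accumulator: pvHalf k = (3^k - 1)/2
def pvHalf : Nat → Int
  | 0 => 0
  | k + 1 => 3 * pvHalf k + 1

-- floor-division/mod facts for divisor 3 (combines the PySem library lemmas)
theorem pvFd3 (n : Int) : PySem.Int.floordiv n 3 * 3 + PySem.Int.mod n 3 = n ∧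
    0 ≤ PySem.Int.mod n 3 ∧ PySem.Int.mod n 3 < 3 :=
  ⟨PySem.Int.floordiv_mul_add_mod n 3, PySem.Int.mod_nonneg n (by norm_num),
   PySem.Int.mod_lt n (by norm_num)⟩

theorem pvHalf_ge (k : Nat) : (k : Int) ≤ pvHalf k := by
  induction k with
  | zero => simp [pvHalf]
  | succ k ih => simp only [pvHalf]; push_cast; omega

-- controlled one-step unfolding equations for the loops
theorem pvLoopA_stop (fuel : Nat) (n : Int) (acc : List Int) (h : ¬ 0 < n) :
    pvLoopA fuel n acc = acc := by
  cases fuel <;> simp [pvLoopA, h]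

theorem pvLoopA_step2 (fuel : Nat) (n : Int) (acc : List Int) (hn : 0 < n)
    (hr : PySem.Int.mod n 3 = 2) :
    pvLoopA (fuel + 1) n acc = pvLoopA fuel (PySem.Int.floordiv (n + 1) 3) (acc ++ [-1]) := by
  rw [pvLoopA, if_pos hn]; simp only [hr, beq_self_eq_true, if_true]

theorem pvLoopA_step (fuel : Nat) (n : Int) (acc : List Int) (hn : 0 < n)
    (hr : PySem.Int.mod n 3 ≠ 2) :
    pvLoopA (fuel + 1) n acc = pvLoopA fuel (PySem.Int.floordiv n 3) (acc ++ [PySem.Int.mod n 3]) := by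
  rw [pvLoopA, if_pos hn]; simp only [beq_iff_eq]; rw [if_neg hr]

theorem pvLoopB_stop (fuel : Nat) (n : Int) (acc : List Int) (h : n = 0) :
    pvLoopB fuel n acc = acc := by
  cases fuel <;> simp [pvLoopB, h]

theorem pvLoopB_step2 (fuel : Nat) (n : Int) (acc : List Int) (hn : n ≠ 0)
    (hr : PySem.Int.mod n 3 = 2) :
    pvLoopB (fuel + 1) n acc = pvLoopB fuel (PySem.Int.floordiv n 3 + 1) (acc ++ [-1]) := by
  rw [pvLoopB, if_pos hn]; simp only [hr, beq_self_eq_true, if_true]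

theorem pvLoopB_step (fuel : Nat) (n : Int) (acc : List Int) (hn : n ≠ 0)
    (hr : PySem.Int.mod n 3 ≠ 2) :
    pvLoopB (fuel + 1) n acc = pvLoopB fuel (PySem.Int.floordiv n 3) (acc ++ [PySem.Int.mod n 3]) := by
  rw [pvLoopB, if_pos hn]; simp only [beq_iff_eq]; rw [if_neg hr]

-- accumulator lemmas: the loops only ever append, so the accumulator factors out
theorem pvLoopA_acc (fuel : Nat) : ∀ (n : Int) (acc : List Int),
    pvLoopA fuel n acc = acc ++ pvLoopA fuel n [] := by
  induction fuel with
  | zero => intro n acc; simp [pvLoopA]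
  | succ fuel ih =>
    intro n acc
    by_cases hn : 0 < n
    · by_cases hr : PySem.Int.mod n 3 = 2
      · rw [pvLoopA_step2 fuel n acc hn hr, pvLoopA_step2 fuel n [] hn hr,
            ih _ _, ih _ ([] ++ [-1])]
        simp
      · rw [pvLoopA_step fuel n acc hn hr, pvLoopA_step fuel n [] hn hr,
            ih _ _, ih _ ([] ++ [PySem.Int.mod n 3])]
        simp
    · rw [pvLoopA_stop _ n acc hn, pvLoopA_stop _ n [] hn]; simp

theorem pvLoopB_acc (fuel : Nat) : ∀ (n : Int) (acc : List Int),
    pvLoopB fuel n acc = acc ++ pvLoopB fuel n [] := by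
  induction fuel with
  | zero => intro n acc; simp [pvLoopB]
  | succ fuel ih =>
    intro n acc
    by_cases hn : n = 0
    · rw [pvLoopB_stop _ n acc hn, pvLoopB_stop _ n [] hn]; simp
    · by_cases hr : PySem.Int.mod n 3 = 2
      · rw [pvLoopB_step2 fuel n acc hn hr, pvLoopB_step2 fuel n [] hn hr,
            ih _ _, ih _ ([] ++ [-1])]
        simp
      · rw [pvLoopB_step fuel n acc hn hr, pvLoopB_step fuel n [] hn hr,
            ih _ _, ih _ ([] ++ [PySem.Int.mod n 3])]
        simp

theorem pvDigits_acc (k : Nat) : ∀ (m : Int) (acc : List Int),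
    pvDigits k m acc = acc ++ pvDigits k m [] := by
  induction k with
  | zero => intro m acc; simp [pvDigits]
  | succ k ih =>
    intro m acc
    simp only [pvDigits]
    rw [ih _ _, ih (PySem.Int.floordiv m 3) ([] ++ [PySem.Int.mod m 3 - 1])]
    simp

-- On positive n the signed loop agrees with A's loop step for step (any common fuel).
theorem pvLoopB_pos (fuel : Nat) : ∀ n : Int, 0 < n →
    pvLoopB fuel n [] = pvLoopA fuel n [] := by
  induction fuel with
  | zero => intro n _; simp [pvLoopA, pvLoopB]
  | succ fuel ih =>
    intro n hn
    have h1 := pvFd3 n; have h2 := pvFd3 (n + 1)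
    by_cases hr : PySem.Int.mod n 3 = 2
    · rw [pvLoopB_step2 fuel n [] (by omega) hr, pvLoopA_step2 fuel n [] hn hr,
          pvLoopB_acc fuel _ _, pvLoopA_acc fuel _ _,
          show PySem.Int.floordiv n 3 + 1 = PySem.Int.floordiv (n + 1) 3 by omega]
      by_cases hz : PySem.Int.floordiv (n + 1) 3 = 0
      · rw [hz, pvLoopB_stop fuel 0 [] rfl, pvLoopA_stop fuel 0 [] (by omega)]
      · rw [ih _ (by omega)]
    · rw [pvLoopB_step fuel n [] (by omega) hr, pvLoopA_step fuel n [] hn hr,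
          pvLoopB_acc fuel _ _, pvLoopA_acc fuel _ _]
      by_cases hz : PySem.Int.floordiv n 3 = 0
      · rw [hz, pvLoopB_stop fuel 0 [] rfl, pvLoopA_stop fuel 0 [] (by omega)]
      · rw [ih _ (by omega)]

-- On negative n, the signed loop computes the trit-wise negation of A's loop on -n.
theorem pvLoopB_neg (fuel : Nat) : ∀ n : Int, n < 0 →
    pvLoopB fuel n [] = (pvLoopA fuel (-n) []).map (fun t => -t) := by
  induction fuel with
  | zero => intro n _; simp [pvLoopA, pvLoopB]
  | succ fuel ih =>
    intro n hn
    have h1 := pvFd3 n; have h2 := pvFd3 (-n); have h3 := pvFd3 (-n + 1)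
    by_cases hr : PySem.Int.mod n 3 = 2
    · -- n ≡ 2 (mod 3) ⇒ -n ≡ 1 (mod 3): A takes the non-carry branch with remainder 1
      have hrA : PySem.Int.mod (-n) 3 = 1 := by omega
      rw [pvLoopB_step2 fuel n [] (by omega) hr, pvLoopA_step fuel (-n) [] (by omega) (by omega),
          pvLoopB_acc fuel _ _, pvLoopA_acc fuel _ _,
          show PySem.Int.floordiv n 3 + 1 = -(PySem.Int.floordiv (-n) 3) by omega, hrA]
      by_cases hz : PySem.Int.floordiv (-n) 3 = 0
      · rw [hz, show -(0 : Int) = 0 by norm_num,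
            pvLoopB_stop fuel 0 [] rfl, pvLoopA_stop fuel 0 [] (by omega)]
        simp
      · rw [ih _ (by omega)]; simp
    · by_cases hr0 : PySem.Int.mod n 3 = 0
      · -- n ≡ 0 (mod 3) ⇒ -n ≡ 0 (mod 3): both take the non-carry branch with remainder 0
        have hrA : PySem.Int.mod (-n) 3 = 0 := by omega
        rw [pvLoopB_step fuel n [] (by omega) hr, pvLoopA_step fuel (-n) [] (by omega) (by omega),
            pvLoopB_acc fuel _ _, pvLoopA_acc fuel _ _,
            show PySem.Int.floordiv n 3 = -(PySem.Int.floordiv (-n) 3) by omega, hr0, hrA]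
        by_cases hz : PySem.Int.floordiv (-n) 3 = 0
        · rw [hz, show -(0 : Int) = 0 by norm_num,
              pvLoopB_stop fuel 0 [] rfl, pvLoopA_stop fuel 0 [] (by omega)]
          simp
        · rw [ih _ (by omega)]; simp
      · -- n ≡ 1 (mod 3) ⇒ -n ≡ 2 (mod 3): A takes the carry branch
        have hr1 : PySem.Int.mod n 3 = 1 := by omega
        have hrA : PySem.Int.mod (-n) 3 = 2 := by omega
        rw [pvLoopB_step fuel n [] (by omega) hr, pvLoopA_step2 fuel (-n) [] (by omega) hrA,
            pvLoopB_acc fuel _ _, pvLoopA_acc fuel _ _,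
            show PySem.Int.floordiv n 3 = -(PySem.Int.floordiv (-n + 1) 3) by omega, hr1]
        by_cases hz : PySem.Int.floordiv (-n + 1) 3 = 0
        · rw [hz, show -(0 : Int) = 0 by norm_num,
              pvLoopB_stop fuel 0 [] rfl, pvLoopA_stop fuel 0 [] (by omega)]
          simp
        · rw [ih _ (by omega)]; simp

-- B's search loop returns the minimal k with a ≤ pvHalf k (with its half value).
theorem pvFindK_spec : ∀ (fuel k : Nat) (a : Int), 1 ≤ k → pvHalf (k - 1) < a →
    a ≤ pvHalf (k + fuel) →
    1 ≤ (pvFindK fuel k (pvHalf k) a).1 ∧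
    (pvFindK fuel k (pvHalf k) a).2 = pvHalf (pvFindK fuel k (pvHalf k) a).1 ∧
    pvHalf ((pvFindK fuel k (pvHalf k) a).1 - 1) < a ∧
    a ≤ (pvFindK fuel k (pvHalf k) a).2 := by
  intro fuel
  induction fuel with
  | zero => intro k a hk hlt hle; exact ⟨hk, rfl, hlt, hle⟩
  | succ fuel ih =>
    intro k a hk hlt hle
    by_cases h : pvHalf k < a
    · rw [pvFindK, if_pos h, show pvHalf k * 3 + 1 = pvHalf (k + 1) by simp [pvHalf]; ring]
      exact ih (k + 1) a (by omega) (by simpa using h)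
        (by rw [show k + 1 + fuel = k + (fuel + 1) by omega]; exact hle)
    · rw [pvFindK, if_neg h]
      exact ⟨hk, rfl, hlt, by omega⟩

theorem pvHalf_pred (k : Nat) (h : 1 ≤ k) : pvHalf k = 3 * pvHalf (k - 1) + 1 := by
  cases k with
  | zero => omega
  | succ k => simp [pvHalf]

-- Offset encoding agrees with the signed loop: on pvHalf (k-1) < |n| ≤ pvHalf k,
-- the k base-3 digits of n + pvHalf k, each minus 1, are A's trits low-order first.
theorem pvDigits_eq_loopB : ∀ (k fuel : Nat) (n : Int), k ≤ fuel → n ≠ 0 →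
    pvHalf (k - 1) < (n.natAbs : Int) → (n.natAbs : Int) ≤ pvHalf k →
    pvDigits k (n + pvHalf k) [] = pvLoopB fuel n [] := by
  intro k
  induction k with
  | zero =>
    intro fuel n _ hn _ hle
    have hh : pvHalf 0 = 0 := rfl
    omega
  | succ k ih =>
    intro fuel n hfuel hn hlt hle
    obtain ⟨f, rfl⟩ : ∃ f, fuel = f + 1 := ⟨fuel - 1, by omega⟩
    have hlt' : pvHalf k < (n.natAbs : Int) := by simpa using hlt
    have h1 := pvFd3 n
    have h1' := pvFd3 (n + pvHalf (k + 1))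
    have hH : pvHalf (k + 1) = 3 * pvHalf k + 1 := rfl
    have hgek := pvHalf_ge k
    -- the signed loop's trit t and next state n': n = 3 * n' + t with t ∈ {-1, 0, 1}
    by_cases hr : PySem.Int.mod n 3 = 2
    · -- trit -1
      have hd : PySem.Int.mod (n + pvHalf (k + 1)) 3 - 1 = -1 := by omega
      have hq : PySem.Int.floordiv (n + pvHalf (k + 1)) 3
          = (PySem.Int.floordiv n 3 + 1) + pvHalf k := by omega
      rw [pvLoopB_step2 f n [] hn hr, pvLoopB_acc f _ _,
          pvDigits, hd, hq, pvDigits_acc k _ _]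
      by_cases hz : PySem.Int.floordiv n 3 + 1 = 0
      · -- next state is 0: n = -1, so k = 0 by minimality and both sides stop
        have hk0 : k = 0 := by omega
        rw [hz, hk0, pvLoopB_stop f 0 [] rfl]
        simp [pvDigits]
      · have hk1 : 1 ≤ k := by
          by_contra h
          have hk0 : k = 0 := by omega
          subst hk0
          have hh : pvHalf (0 + 1) = 1 := rfl
          omega
        have hP := pvHalf_pred k hk1
        have hge := pvHalf_ge (k - 1)
        rw [ih f _ (by omega) hz (by omega) (by omega)]
    · -- trit rem ∈ {0, 1}
      have hd : PySem.Int.mod (n + pvHalf (k + 1)) 3 - 1 = PySem.Int.mod n 3 := by omega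
      have hq : PySem.Int.floordiv (n + pvHalf (k + 1)) 3
          = PySem.Int.floordiv n 3 + pvHalf k := by omega
      rw [pvLoopB_step f n [] hn hr, pvLoopB_acc f _ _,
          pvDigits, hd, hq, pvDigits_acc k _ _]
      by_cases hz : PySem.Int.floordiv n 3 = 0
      · have hk0 : k = 0 := by omega
        rw [hz, hk0, pvLoopB_stop f 0 [] rfl]
        simp [pvDigits]
      · have hk1 : 1 ≤ k := by
          by_contra h
          have hk0 : k = 0 := by omega
          subst hk0
          have hh : pvHalf (0 + 1) = 1 := rfl
          omega
        have hP := pvHalf_pred k hk1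
        have hge := pvHalf_ge (k - 1)
        rw [ih f _ (by omega) hz (by omega) (by omega)]

-- B equals the signed loop on nonzero input.
theorem alt_eq_loopB (value : Int) (h0 : value ≠ 0) :
    to_balanced_ternary_alt value = (pvLoopB value.natAbs value []).reverse := by
  unfold to_balanced_ternary_alt
  simp only [beq_iff_eq, h0, if_neg, not_false_eq_true]
  have habs : |value| = (value.natAbs : Int) := Int.abs_eq_natAbs value
  have h1 : (1 : Int) = pvHalf 1 := by simp [pvHalf]
  have hstart : pvHalf 0 < (value.natAbs : Int) := by simp [pvHalf]; omega
  have hcap : (value.natAbs : Int) ≤ pvHalf (1 + value.natAbs) := by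
    have := pvHalf_ge (1 + value.natAbs)
    push_cast at this
    omega
  have hs := pvFindK_spec value.natAbs 1 (value.natAbs : Int) (by omega)
    (by simpa using hstart) hcap
  obtain ⟨hk1, hhalf, hlow, hhigh⟩ := hs
  rw [habs, h1]
  set p := pvFindK value.natAbs 1 (pvHalf 1) (value.natAbs : Int) with hp
  have hkle : p.1 ≤ value.natAbs := by
    have := pvHalf_ge (p.1 - 1)
    push_cast at this
    omega
  rw [hhalf, pvDigits_eq_loopB p.1 value.natAbs value hkle h0 hlow (by omega)]

-- ===== VERDICT (by name: the statement is the Claim_ definition above) =====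
theorem to_balanced_ternary_spec : Claim_equal_to_balanced_ternary := by
  intro value _
  unfold Spec_to_balanced_ternary
  by_cases h0 : value = 0
  · simp [h0, to_balanced_ternary, to_balanced_ternary_alt]
  · rw [alt_eq_loopB value h0]
    unfold to_balanced_ternary
    simp only [beq_iff_eq, h0, if_neg, not_false_eq_true]
    by_cases hneg : value < 0
    · simp only [hneg, if_true, abs_of_neg hneg]
      rw [show (-value).toNat = value.natAbs by omega, pvLoopB_neg value.natAbs value hneg]
    · have hpos : 0 < value := by omega
      simp only [hneg, if_false, abs_of_pos hpos]
      rw [show value.toNat = value.natAbs by omega, pvLoopB_pos value.natAbs value hpos]
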